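-- pv_equiv track=rewrite | github.com/RishabhMankar30/Python-basic-Assignment-1- | 23) Python Basics Progeamming Assignment_23.py | square_digit
-- ===== SOURCE A (Python) =====
-- def square_digit(n):
--     s = str(n)  # converted int into str, for iteration
--     l = []
--     for i in s:
--         sq = int(i) ** 2
--         num_str = str(sq)  # convert int into str, bcz join will work only on string.
--         l.append(num_str)
--     j = "".join(l)
--     con_int = int(j)  # convert str into int, bcz final output should be int.
--     return con_int
-- ===== SOURCE B (Python) =====
-- def square_digit(n):
--     # Pure arithmetic: extract decimal digits by divmod, no string conversion at all.
--     digits = []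
--     while n > 0:
--         n, d = divmod(n, 10)
--         digits.append(d)
--     if not digits:
--         digits = [0]
--     result = 0
--     for d in reversed(digits):
--         sq = d * d
--         result = result * (10 if sq < 10 else 100) + sq
--     return result
-- ===== Notes on version B (the rewrite author's own statement) =====
-- stated objective: alternative
-- what changed: B never touches strings: it extracts the decimal digits arithmetically with divmod, then folds each digit's square into an integer accumulator (shifting by 10 or 100 depending on whether the square has one or two digits), whereas A round-trips through str(), a list of square-strings, join and a final int() parse.
import Mathlib
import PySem

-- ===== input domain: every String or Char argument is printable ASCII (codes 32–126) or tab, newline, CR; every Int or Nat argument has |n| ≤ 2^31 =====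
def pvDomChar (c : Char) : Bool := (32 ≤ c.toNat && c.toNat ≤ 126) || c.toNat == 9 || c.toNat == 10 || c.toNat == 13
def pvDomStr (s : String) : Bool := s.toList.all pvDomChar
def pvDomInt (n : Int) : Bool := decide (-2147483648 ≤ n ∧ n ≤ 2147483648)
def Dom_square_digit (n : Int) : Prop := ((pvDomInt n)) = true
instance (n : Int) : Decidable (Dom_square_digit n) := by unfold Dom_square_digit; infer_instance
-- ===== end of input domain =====

-- B drops strings entirely: it extracts the decimal digits arithmetically with divmod and folds
-- each digit's square into an integer accumulator; objective: alternative (same cost, no strings).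

-- ===== PORT A =====
-- Strings are carried as List Char (PySem.Chars level): str(n) = PySem.Int.toChars n,
-- int(s) = PySem.Int.ofChars? (none = ValueError, excluded by Pre_), "".join(l) = List.flatten (exact).
def square_digit (n : Int) : Int :=
  match (PySem.Int.toChars n).foldl                           -- s = str(n); for i in s: ... l.append(num_str)
    (fun acc i =>
      match acc with
      | none => none                                          -- a ValueError already occurred
      | some l =>
        match PySem.Int.ofChars? [i] with                     -- int(i); none = ValueError
        | none => none
        | some d => some (l ++ [PySem.Int.toChars (d ^ 2)]))  -- sq = int(i)**2; num_str = str(sq)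
    (some []) with
  | none => 0                                                 -- ValueError path (outside Pre_)
  | some l =>
    match PySem.Int.ofChars? l.flatten with                   -- con_int = int("".join(l))
    | none => 0                                               -- unreachable: j is all digits
    | some v => v

-- ===== PORT B =====
-- while n > 0: n, d = divmod(n, 10); digits.append(d)   (divmod = floordiv/mod, divisor 10 ≠ 0)
def pyDigitLoop (n : Int) (digits : List Int) : List Int :=
  if _h : 0 < n then
    pyDigitLoop (PySem.Int.floordiv n 10) (digits ++ [PySem.Int.mod n 10])
  else digits
termination_by n.toNat
decreasing_by
  have h10 : PySem.Int.floordiv n 10 = n / 10 :=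
    PySem.Int.floordiv_eq_ediv_of_pos (by omega)
  rw [h10]; omega

def square_digit_alt (n : Int) : Int :=
  let digits := pyDigitLoop n []                              -- the divmod loop
  let digits := if digits = [] then [0] else digits           -- if not digits: digits = [0]
  digits.reverse.foldl                                        -- for d in reversed(digits):
    (fun result d => result * (if d * d < 10 then 10 else 100) + d * d) 0

-- ===== PRECONDITION & SPEC =====
-- Pre_ excludes exactly the negative inputs: there str(n) starts with a minus sign and A raises
-- ValueError when int() hits it.
def Pre_square_digit (n : Int) : Prop := 0 ≤ n
instance (n : Int) : Decidable (Pre_square_digit n) := by unfold Pre_square_digit; infer_instance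
def pvWitness_square_digit : Int := 9119

def Spec_square_digit (n : Int) (out : Int) : Prop := out = square_digit_alt n
instance (n : Int) (out : Int) : Decidable (Spec_square_digit n out) := by unfold Spec_square_digit; infer_instance

-- ===== CLAIM (what is proved, stated in full; the proofs are below) =====
def Claim_equal_square_digit : Prop := ∀ (n : Int), Dom_square_digit n → Pre_square_digit n → Spec_square_digit n (square_digit n)

-- ===== LEMMAS AND PROOFS =====

/-- The decimal value of a digit string, as Python's int() computes it. -/
def valNat (l : List Char) : Nat := l.foldl (fun x c => x * 10 + (c.toNat - 48)) 0

/-- The char list of str(v**2) for a digit value `v`. -/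
def sqChars (v : Nat) : List Char := PySem.Int.toChars ((v : Int) ^ 2)

/-- Least-significant-first decimal digits of a natural number (empty for 0). -/
def lsb (m : Nat) : List Nat :=
  if h : m = 0 then [] else (m % 10) :: lsb (m / 10)
termination_by m
decreasing_by exact Nat.div_lt_self (Nat.pos_of_ne_zero h) (by norm_num)

/-- One unfolding of the (private) digit-scanning loop inside `PySem.Int.ofChars?`;
`parseD` is stated for any `g` satisfying it and is applied to that private loop purely
by unification (its recursion is characterised, never re-implemented). -/
def goBody (g : List Char → Bool → Nat → Option Nat) (cs : List Char) (b : Bool) (a : Nat) : Option Nat :=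
  match cs with
  | [] => if b = true then some a else none
  | c :: rest =>
    if c.isDigit = true then g rest true (a * 10 + (c.toNat - '0'.toNat))
    else
      if c = '_' ∧ b = true then
        match rest with
        | d :: _ => if d.isDigit = true then g rest false a else none
        | [] => none
      else none

theorem parseD (g : List Char → Bool → Nat → Option Nat)
    (hg : ∀ cs b a, g cs b a = goBody g cs b a)
    (ds : List Char) (b : Bool) (a : Nat) (hdig : ∀ c ∈ ds, c.isDigit = true)
    (hne : ds = [] → b = true) :
    g ds b a = some (ds.foldl (fun x c => x * 10 + (c.toNat - 48)) a) := by
  induction ds generalizing b a with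
  | nil => rw [hg]; simp [goBody, hne rfl]
  | cons c tl ih =>
    rw [hg]
    have hc : c.isDigit = true := hdig c (by simp)
    simp only [goBody, hc, if_true, List.foldl_cons]
    have h48 : c.toNat - '0'.toNat = c.toNat - 48 := rfl
    rw [h48]
    exact ih true _ (fun x hx => hdig x (by simp [hx])) (by simp)

theorem char_eq_of_toNat (c d : Char) (h : c.toNat = d.toNat) : c = d := by
  apply Char.ext
  apply UInt32.toNat_inj.mp
  exact h

theorem digit_char_eq (c : Char) (h : c.isDigit = true) :
    c = '0' ∨ c = '1' ∨ c = '2' ∨ c = '3' ∨ c = '4' ∨ c = '5' ∨ c = '6' ∨ c = '7' ∨ c = '8' ∨ c = '9' := by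
  simp only [Char.isDigit, Bool.and_eq_true, decide_eq_true_eq] at h
  obtain ⟨h1, h2⟩ := h
  have h1' : 48 ≤ c.toNat := h1
  have h2' : c.toNat ≤ 57 := h2
  interval_cases hn : c.toNat <;>
    [exact Or.inl (char_eq_of_toNat _ _ hn);
     exact Or.inr (Or.inl (char_eq_of_toNat _ _ hn));
     exact Or.inr (Or.inr (Or.inl (char_eq_of_toNat _ _ hn)));
     exact Or.inr (Or.inr (Or.inr (Or.inl (char_eq_of_toNat _ _ hn))));
     exact Or.inr (Or.inr (Or.inr (Or.inr (Or.inl (char_eq_of_toNat _ _ hn)))));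
     exact Or.inr (Or.inr (Or.inr (Or.inr (Or.inr (Or.inl (char_eq_of_toNat _ _ hn))))));
     exact Or.inr (Or.inr (Or.inr (Or.inr (Or.inr (Or.inr (Or.inl (char_eq_of_toNat _ _ hn)))))));
     exact Or.inr (Or.inr (Or.inr (Or.inr (Or.inr (Or.inr (Or.inr (Or.inl (char_eq_of_toNat _ _ hn))))))));
     exact Or.inr (Or.inr (Or.inr (Or.inr (Or.inr (Or.inr (Or.inr (Or.inr (Or.inl (char_eq_of_toNat _ _ hn)))))))));
     exact Or.inr (Or.inr (Or.inr (Or.inr (Or.inr (Or.inr (Or.inr (Or.inr (Or.inr (char_eq_of_toNat _ _ hn)))))))))]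

theorem digit_not_space (c : Char) (h : c.isDigit = true) : PySem.Int.isIntSpace c = false := by
  rcases digit_char_eq c h with rfl|rfl|rfl|rfl|rfl|rfl|rfl|rfl|rfl|rfl <;> decide

theorem dropWhile_all_false {p : Char → Bool} {l : List Char} (h : ∀ x ∈ l, p x = false) :
    l.dropWhile p = l := by
  rw [List.dropWhile_eq_self_iff]
  intro hl
  simp [h _ (l.getElem_mem hl)]

/-- Python's int() on a nonempty all-digit string returns its decimal value. -/
theorem parse_digits (c : Char) (tl : List Char) (hdig : ∀ x ∈ c :: tl, x.isDigit = true) :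
    PySem.Int.ofChars? (c :: tl) = some ((valNat (c :: tl) : Nat) : Int) := by
  have hns : ∀ x ∈ c :: tl, PySem.Int.isIntSpace x = false :=
    fun x hx => digit_not_space x (hdig x hx)
  have htl : ∀ x ∈ tl, x.isDigit = true := fun x hx => hdig x (by simp [hx])
  unfold valNat
  rcases digit_char_eq c (hdig c (by simp)) with rfl|rfl|rfl|rfl|rfl|rfl|rfl|rfl|rfl|rfl <;>
  · simp only [PySem.Int.ofChars?]
    rw [dropWhile_all_false hns]
    rw [dropWhile_all_false (fun x hx => hns x (by simp at hx ⊢; tauto))]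
    rw [List.reverse_reverse]
    split
    case _ ds heq => exact absurd heq (by simp)
    case _ ds heq => exact absurd heq (by simp)
    case _ h1 h2 =>
      refine Eq.trans (congrArg (fun o : Option Nat => Option.map (fun n : Int => n)
          (o >>= fun a => pure (↑a : Int)))
          (parseD _ ?_ tl true _ htl (by simp))) ?_
      · intro cs b a
        cases cs with
        | nil => rfl
        | cons x rest => rfl
      · simp [List.foldl_cons]

theorem parse1 (c : Char) (h : c.isDigit = true) :
    PySem.Int.ofChars? [c] = some ((c.toNat - 48 : Nat) : Int) := by
  have := parse_digits c [] (by simpa using h)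
  simpa [valNat] using this

theorem sq_facts (v : Nat) (hv : v ≤ 9) :
    ((sqChars v).all (fun c => c.isDigit) = true) ∧ sqChars v ≠ [] ∧ valNat (sqChars v) = v ^ 2 ∧
    ((10 : Int) ^ (sqChars v).length = if (v : Int) * v < 10 then 10 else 100) := by
  interval_cases v <;> exact ⟨by decide, by decide, by decide, by decide⟩

theorem sq_digits (v : Nat) (hv : v ≤ 9) : ∀ x ∈ sqChars v, x.isDigit = true := by
  have := (sq_facts v hv).1
  simpa [List.all_eq_true] using this

theorem valAux (v : List Char) : ∀ a : Nat,
    v.foldl (fun x c => x * 10 + (c.toNat - 48)) a = a * 10 ^ v.length + valNat v := by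
  induction v with
  | nil => intro a; simp [valNat]
  | cons c w ih =>
    intro a
    have hv : valNat (c :: w) = (c.toNat - 48) * 10 ^ w.length + valNat w := by
      unfold valNat
      rw [List.foldl_cons, ih]
      norm_num
      rfl
    rw [List.foldl_cons, ih, hv]
    simp only [List.length_cons, pow_succ]
    ring

theorem valNat_append (u v : List Char) :
    valNat (u ++ v) = valNat u * 10 ^ v.length + valNat v := by
  unfold valNat
  rw [List.foldl_append]
  exact valAux v _

/-- A's accumulation loop builds exactly the list of square-strings of the digit values. -/
theorem Aloop (ds : List Char) (hd : ∀ c ∈ ds, c.isDigit = true) : ∀ L : List (List Char),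
    ds.foldl (fun acc i =>
      match acc with
      | none => none
      | some l =>
        match PySem.Int.ofChars? [i] with
        | none => none
        | some d => some (l ++ [PySem.Int.toChars (d ^ 2)])) (some L)
    = some (L ++ ds.map (fun c => sqChars (c.toNat - 48))) := by
  induction ds with
  | nil => intro L; simp
  | cons c w ih =>
    intro L
    rw [List.foldl_cons, parse1 c (hd c (by simp))]
    have : PySem.Int.toChars ((((c.toNat - 48 : Nat) : Int)) ^ 2) = sqChars (c.toNat - 48) := rfl
    simp only [this]
    rw [ih (fun x hx => hd x (by simp [hx]))]
    simp

/-- Elements of `lsb` are digits. -/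
theorem lsb_lt (m : Nat) : ∀ d ∈ lsb m, d ≤ 9 := by
  induction m using Nat.strong_induction_on with
  | _ m ih =>
    intro d hd
    rw [lsb] at hd
    split at hd
    · simp at hd
    case _ h =>
      rcases List.mem_cons.mp hd with rfl | hd'
      · omega
      · exact ih (m / 10) (Nat.div_lt_self (Nat.pos_of_ne_zero h) (by norm_num)) d hd'

/-- The divmod loop produces the Int cast of `lsb`. -/
theorem pyDigitLoop_eq (n : Int) (h : 0 ≤ n) : ∀ acc : List Int,
    pyDigitLoop n acc = acc ++ (lsb n.toNat).map Int.ofNat := by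
  suffices H : ∀ (k : Nat) (n : Int), 0 ≤ n → n.toNat = k → ∀ acc : List Int,
      pyDigitLoop n acc = acc ++ (lsb n.toNat).map Int.ofNat from H n.toNat n h rfl
  intro k
  induction k using Nat.strong_induction_on with
  | _ k ih =>
    intro n h hk acc
    rw [pyDigitLoop]
    by_cases hp : 0 < n
    · simp only [hp, dif_pos]
      have hq : PySem.Int.floordiv n 10 = n / 10 := PySem.Int.floordiv_eq_ediv_of_pos (by omega)
      have hr : PySem.Int.mod n 10 = n % 10 := PySem.Int.mod_eq_emod_of_pos (by omega)
      have hq0 : (0:Int) ≤ n / 10 := Int.ediv_nonneg h (by omega)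
      have hqk : (n / 10).toNat < k := by omega
      rw [hq, hr, ih (n / 10).toNat hqk (n / 10) hq0 rfl]
      have hm0 : n.toNat ≠ 0 := by omega
      conv_rhs => rw [lsb]
      simp only [hm0, dif_neg, not_false_iff, List.map_cons]
      have h1 : n % 10 = Int.ofNat (n.toNat % 10) := by
        simp [Int.ofNat_eq_natCast]; omega
      have h2 : (n / 10).toNat = n.toNat / 10 := by omega
      rw [h1, h2]
      simp
    · simp only [hp, dif_neg, not_false_iff]
      have : n.toNat = 0 := by omega
      rw [this, lsb]
      simp

theorem digitChar_isDigit (d : Nat) (hd : d ≤ 9) : (Nat.digitChar d).isDigit = true := by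
  interval_cases d <;> decide

theorem digitChar_val (d : Nat) (hd : d ≤ 9) : (Nat.digitChar d).toNat - 48 = d := by
  interval_cases d <;> decide

/-- `Nat.toDigitsCore` emits the reversed `lsb` digits (with the top digit even for 0). -/
theorem toDigitsCore_eq : ∀ (fuel m : Nat), m < fuel → ∀ ds : List Char,
    Nat.toDigitsCore 10 fuel m ds
      = ((m % 10 :: lsb (m / 10)).reverse.map Nat.digitChar) ++ ds := by
  intro fuel
  induction fuel with
  | zero => intro m hm; omega
  | succ fuel ih =>
    intro m hm ds
    rw [Nat.toDigitsCore]
    by_cases h0 : m / 10 = 0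
    · rw [if_pos h0, h0, lsb]
      simp
    · rw [if_neg h0]
      have hlt : m / 10 < fuel := by
        have : m / 10 < m := Nat.div_lt_self (by omega) (by norm_num)
        omega
      rw [ih (m / 10) hlt]
      conv_rhs => rw [lsb]
      simp only [h0, dif_neg, not_false_iff]
      simp

/-- str(n) for n ≥ 0 spelled with digit values: the reversed `lsb`, with '0' for n = 0. -/
theorem toChars_eq (n : Int) (h : 0 ≤ n) :
    PySem.Int.toChars n
      = ((if n.toNat = 0 then [0] else (lsb n.toNat).reverse).map Nat.digitChar) := by
  have hds : PySem.Int.toChars n = Nat.toDigits 10 n.toNat := by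
    simp [PySem.Int.toChars, not_lt.mpr h]
  rw [hds, Nat.toDigits, toDigitsCore_eq (n.toNat + 1) n.toNat (by omega)]
  by_cases h0 : n.toNat = 0
  · rw [if_pos h0, h0]
    rw [lsb]
    simp
  · rw [if_neg h0]
    conv_rhs => rw [lsb]
    simp only [h0, dif_neg, not_false_iff]
    simp

/-- B's numeric fold equals the decimal value of the concatenated square-strings. -/
theorem Bfold (ds : List Nat) (hd : ∀ d ∈ ds, d ≤ 9) : ∀ r : Int,
    (ds.map Int.ofNat).foldl
      (fun result d => result * (if d * d < 10 then 10 else 100) + d * d) r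
    = r * 10 ^ ((ds.map sqChars).flatten).length
        + (valNat ((ds.map sqChars).flatten) : Int) := by
  induction ds with
  | nil => intro r; simp [valNat]
  | cons d w ih =>
    intro r
    obtain ⟨_, _, hval, hlen⟩ := sq_facts d (hd d (by simp))
    rw [List.map_cons, List.foldl_cons, ih (fun x hx => hd x (by simp [hx]))]
    rw [List.map_cons, List.flatten_cons, valNat_append, List.length_append]
    rw [hval]
    simp only [Int.ofNat_eq_natCast] at hlen ⊢
    rw [← hlen]
    push_cast
    ring

theorem square_digit_eq_alt (n : Int) (h : 0 ≤ n) : square_digit n = square_digit_alt n := by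
  -- the digit-value list, most significant first
  set dv : List Nat := if n.toNat = 0 then [0] else (lsb n.toNat).reverse with hdv
  have hdv9 : ∀ d ∈ dv, d ≤ 9 := by
    rw [hdv]
    split
    · intro d hd; simp at hd; omega
    · intro d hd; exact lsb_lt n.toNat d (List.mem_reverse.mp hd)
  -- A side
  have hchars : PySem.Int.toChars n = dv.map Nat.digitChar := toChars_eq n h
  have hdigs : ∀ c ∈ dv.map Nat.digitChar, c.isDigit = true := by
    intro c hc
    rcases List.mem_map.mp hc with ⟨d, hd, rfl⟩
    exact digitChar_isDigit d (hdv9 d hd)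
  have hmapval : (dv.map Nat.digitChar).map (fun c => sqChars (c.toNat - 48)) = dv.map sqChars := by
    rw [List.map_map]
    apply List.map_congr_left
    intro d hd
    simp [digitChar_val d (hdv9 d hd)]
  have hdvne : dv ≠ [] := by
    rw [hdv]; split
    · simp
    case _ h0 =>
      simp only [ne_eq, List.reverse_eq_nil_iff]
      rw [lsb]
      simp [h0]
  have hWne : ((dv.map sqChars)).flatten ≠ [] := by
    obtain ⟨d0, dt, hcons⟩ := List.exists_cons_of_ne_nil hdvne
    rw [hcons, List.map_cons, List.flatten_cons]
    have := (sq_facts d0 (hdv9 d0 (by rw [hcons]; simp))).2.1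
    intro hnil
    exact this (List.append_eq_nil_iff.mp hnil).1
  obtain ⟨c, tl, hW⟩ := List.exists_cons_of_ne_nil hWne
  have hdigW : ∀ x ∈ c :: tl, x.isDigit = true := by
    rw [← hW]
    intro x hx
    rcases List.mem_flatten.mp hx with ⟨l, hl, hxl⟩
    rcases List.mem_map.mp hl with ⟨d, hd, rfl⟩
    exact sq_digits d (hdv9 d hd) x hxl
  have hA : square_digit n = (valNat ((dv.map sqChars).flatten) : Int) := by
    unfold square_digit
    rw [hchars, Aloop _ hdigs []]
    simp only [List.nil_append, hmapval]
    rw [hW, parse_digits c tl hdigW, ← hW]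
  -- B side
  have hB : square_digit_alt n = (valNat ((dv.map sqChars).flatten) : Int) := by
    unfold square_digit_alt
    simp only []
    rw [pyDigitLoop_eq n h []]
    have hrev : (if ((lsb n.toNat).map Int.ofNat) = [] then [(0:Int)]
                 else ((lsb n.toNat).map Int.ofNat)).reverse
               = dv.map Int.ofNat := by
      rw [hdv]
      by_cases h0 : n.toNat = 0
      · rw [h0, lsb]; simp [Int.ofNat_eq_natCast]
      · have : lsb n.toNat ≠ [] := by rw [lsb]; simp [h0]
        rw [if_neg (by simp [this]), if_neg h0]
        simp [List.map_reverse]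
    simp only [List.nil_append]
    rw [hrev, Bfold dv hdv9 0]
    simp
  rw [hA, hB]

-- ===== VERDICT (by name: the statement is the Claim_ definition above) =====
theorem square_digit_spec : Claim_equal_square_digit := by
  intro n _ hpre
  unfold Spec_square_digit
  exact square_digit_eq_alt n hpre
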